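-- pv_equiv track=rewrite | github.com/kava117/CMS430-AI | sokoban_solver/core/moves.py | get_reachable_positions
-- ===== SOURCE A (Python) =====
-- from collections import deque
--
-- DIRECTIONS = {
--     'U': (0, -1),
--     'D': (0, 1),
--     'L': (-1, 0),
--     'R': (1, 0),
-- }
--
-- def get_reachable_positions(player_pos, boxes, walls, width, height):
--     """BFS to find all positions the player can reach without pushing boxes.
--
--     Args:
--         player_pos: (x, y) starting position.
--         boxes: frozenset of (x, y) box positions (treated as obstacles).
--         walls: frozenset of (x, y) wall positions.
--         width: Grid width.
--         height: Grid height.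
--
--     Returns:
--         set of (x, y) reachable positions.
--     """
--     obstacles = walls | boxes
--     visited = {player_pos}
--     queue = deque([player_pos])
--
--     while queue:
--         x, y = queue.popleft()
--         for dx, dy in DIRECTIONS.values():
--             nx, ny = x + dx, y + dy
--             if (0 <= nx < width and 0 <= ny < height and
--                     (nx, ny) not in obstacles and (nx, ny) not in visited):
--                 visited.add((nx, ny))
--                 queue.append((nx, ny))
--
--     return visited
-- ===== SOURCE B (Python) =====
-- from collections import deque  # noqa: F401  (module context; B itself does not use it)
--
-- DIRECTIONS = {
--     'U': (0, -1),
--     'D': (0, 1),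
--     'L': (-1, 0),
--     'R': (1, 0),
-- }
--
-- def get_reachable_positions(player_pos, boxes, walls, width, height):
--     """Layered flood fill: expand the whole frontier at once (no per-cell queue).
--
--     Same contract as the original: boxes/walls are frozensets of (x, y),
--     returns the set of positions reachable without pushing boxes.
--     """
--     obstacles = walls | boxes
--     reachable = {player_pos}
--     frontier = [player_pos]
--     while frontier:
--         candidates = [(x + dx, y + dy)
--                       for (x, y) in frontier
--                       for (dx, dy) in DIRECTIONS.values()]
--         frontier = []
--         for n in candidates:
--             if (0 <= n[0] < width and 0 <= n[1] < height
--                     and n not in obstacles and n not in reachable):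
--                 reachable.add(n)
--                 frontier.append(n)
--     return reachable
-- ===== Notes on version B (the rewrite author's own statement) =====
-- stated objective: simpler
-- what changed: Replaces the deque-based per-cell BFS by a layered flood fill: each round builds the flat list of all neighbours of the current frontier and filters it into the next frontier, so there is no queue data structure at all.
import Mathlib
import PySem

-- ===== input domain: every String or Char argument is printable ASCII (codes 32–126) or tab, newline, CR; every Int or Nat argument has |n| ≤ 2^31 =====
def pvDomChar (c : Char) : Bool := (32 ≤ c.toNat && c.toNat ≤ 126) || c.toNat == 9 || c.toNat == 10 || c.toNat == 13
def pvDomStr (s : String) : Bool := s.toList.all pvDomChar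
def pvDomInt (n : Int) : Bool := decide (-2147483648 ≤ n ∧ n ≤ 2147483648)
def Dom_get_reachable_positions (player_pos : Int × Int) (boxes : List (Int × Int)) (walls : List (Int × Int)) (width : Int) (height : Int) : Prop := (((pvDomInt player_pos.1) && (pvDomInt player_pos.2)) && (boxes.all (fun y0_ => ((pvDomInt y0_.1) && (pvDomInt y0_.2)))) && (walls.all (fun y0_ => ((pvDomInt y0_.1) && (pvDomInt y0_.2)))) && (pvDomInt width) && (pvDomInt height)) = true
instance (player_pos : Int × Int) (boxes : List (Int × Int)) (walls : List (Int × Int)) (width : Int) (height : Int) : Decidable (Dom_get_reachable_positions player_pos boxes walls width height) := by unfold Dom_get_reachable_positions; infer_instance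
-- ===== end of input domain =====

-- B replaces A's deque-based per-cell BFS by a layered flood fill (whole-frontier expansion); same return value, objective: simpler.

-- DIRECTIONS.values() in insertion order: U, D, L, R
def pvDirs : List (Int × Int) := [(0, -1), (0, 1), (-1, 0), (1, 0)]

-- Termination-measure machinery (used only by the loops' `decreasing_by`, cited by name):
-- the number of in-grid cells not yet visited.
def pvGridF (width height : Int) : Finset (Nat × Nat) :=
  Finset.range width.toNat ×ˢ Finset.range height.toNat

def pvUn (width height : Int) (v : List (Int × Int)) : Nat :=
  ((pvGridF width height).filter (fun p => ((p.1 : Int), (p.2 : Int)) ∉ v)).card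

lemma pvUn_add_lt (width height : Int) (v : PySem.Set (Int × Int)) (n : Int × Int)
    (h1 : 0 ≤ n.1) (h2 : n.1 < width) (h3 : 0 ≤ n.2) (h4 : n.2 < height) (h5 : n ∉ v) :
    pvUn width height (PySem.Set.add v n) < pvUn width height v := by
  unfold pvUn
  apply Finset.card_lt_card
  constructor
  · intro p hp
    simp only [Finset.mem_filter] at hp ⊢
    exact ⟨hp.1, fun hpv => hp.2 (by simp [PySem.Set.mem_add, hpv])⟩
  · intro hsub
    have hcast : ((n.1.toNat : Int), (n.2.toNat : Int)) = n := by
      obtain ⟨a, b⟩ := n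
      simp only [Prod.mk.injEq]
      constructor <;> omega
    have hn : (n.1.toNat, n.2.toNat) ∈
        (pvGridF width height).filter (fun p => ((p.1 : Int), (p.2 : Int)) ∉ v) := by
      simp only [Finset.mem_filter, pvGridF, Finset.mem_product, Finset.mem_range]
      refine ⟨⟨by omega, by omega⟩, ?_⟩
      rw [hcast]
      exact h5
    have hmem := hsub hn
    rw [Finset.mem_filter] at hmem
    rw [hcast] at hmem
    simp [PySem.Set.mem_add] at hmem

-- filtering one candidate cell into the state never raises 2*unvisited + listLength
lemma pvCell_le (width height : Int) (obst v : PySem.Set (Int × Int))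
    (l : List (Int × Int)) (n : Int × Int) :
    2 * pvUn width height
        (if 0 ≤ n.1 ∧ n.1 < width ∧ 0 ≤ n.2 ∧ n.2 < height ∧ n ∉ obst ∧ n ∉ v
          then (PySem.Set.add v n, l ++ [n]) else (v, l)).1 +
      (if 0 ≤ n.1 ∧ n.1 < width ∧ 0 ≤ n.2 ∧ n.2 < height ∧ n ∉ obst ∧ n ∉ v
          then (PySem.Set.add v n, l ++ [n]) else (v, l)).2.length ≤
      2 * pvUn width height v + l.length := by
  split_ifs with hc
  · obtain ⟨h1, h2, h3, h4, _, h6⟩ := hc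
    have := pvUn_add_lt width height v n h1 h2 h3 h4 h6
    simp only [List.length_append, List.length_cons, List.length_nil]
    omega
  · exact le_refl _

-- ===== PORT A =====
-- the body of A's inner `for dx, dy in DIRECTIONS.values()` loop, folded over pvDirs
def pvAstep (obst : PySem.Set (Int × Int)) (width height : Int)
    (st : PySem.Set (Int × Int) × List (Int × Int)) (c : Int × Int) :
    PySem.Set (Int × Int) × List (Int × Int) :=
  pvDirs.foldl (fun st d =>
    let n : Int × Int := (c.1 + d.1, c.2 + d.2)
    if 0 ≤ n.1 ∧ n.1 < width ∧ 0 ≤ n.2 ∧ n.2 < height ∧ n ∉ obst ∧ n ∉ st.1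
    then (PySem.Set.add st.1 n, st.2 ++ [n]) else st) st

lemma pvAfold_le (obst : PySem.Set (Int × Int)) (width height : Int) (c : Int × Int) :
    ∀ (ds : List (Int × Int)) (v : PySem.Set (Int × Int)) (l : List (Int × Int)),
    2 * pvUn width height (ds.foldl (fun st d =>
        let n : Int × Int := (c.1 + d.1, c.2 + d.2)
        if 0 ≤ n.1 ∧ n.1 < width ∧ 0 ≤ n.2 ∧ n.2 < height ∧ n ∉ obst ∧ n ∉ st.1
        then (PySem.Set.add st.1 n, st.2 ++ [n]) else st) (v, l)).1 +
      (ds.foldl (fun st d =>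
        let n : Int × Int := (c.1 + d.1, c.2 + d.2)
        if 0 ≤ n.1 ∧ n.1 < width ∧ 0 ≤ n.2 ∧ n.2 < height ∧ n ∉ obst ∧ n ∉ st.1
        then (PySem.Set.add st.1 n, st.2 ++ [n]) else st) (v, l)).2.length ≤
      2 * pvUn width height v + l.length := by
  intro ds
  induction ds with
  | nil => intro v l; exact le_refl _
  | cons d ds ih =>
    intro v l
    rw [List.foldl_cons]
    have h1 := ih (if 0 ≤ c.1 + d.1 ∧ c.1 + d.1 < width ∧ 0 ≤ c.2 + d.2 ∧ c.2 + d.2 < height ∧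
          (c.1 + d.1, c.2 + d.2) ∉ obst ∧ (c.1 + d.1, c.2 + d.2) ∉ v
        then (PySem.Set.add v (c.1 + d.1, c.2 + d.2), l ++ [(c.1 + d.1, c.2 + d.2)]) else (v, l)).1
      (if 0 ≤ c.1 + d.1 ∧ c.1 + d.1 < width ∧ 0 ≤ c.2 + d.2 ∧ c.2 + d.2 < height ∧
          (c.1 + d.1, c.2 + d.2) ∉ obst ∧ (c.1 + d.1, c.2 + d.2) ∉ v
        then (PySem.Set.add v (c.1 + d.1, c.2 + d.2), l ++ [(c.1 + d.1, c.2 + d.2)]) else (v, l)).2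
    rw [Prod.mk.eta] at h1
    exact le_trans h1 (pvCell_le width height obst v l (c.1 + d.1, c.2 + d.2))

lemma pvAstep_le (obst : PySem.Set (Int × Int)) (width height : Int)
    (v : PySem.Set (Int × Int)) (q : List (Int × Int)) (c : Int × Int) :
    2 * pvUn width height (pvAstep obst width height (v, q) c).1 +
      (pvAstep obst width height (v, q) c).2.length ≤
      2 * pvUn width height v + q.length := by
  unfold pvAstep
  exact pvAfold_le obst width height c pvDirs v q

-- A's `while queue:` loop; the deque is a List, popleft = head
def pvAloop (obst : PySem.Set (Int × Int)) (width height : Int)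
    (visited : PySem.Set (Int × Int)) (queue : List (Int × Int)) : List (Int × Int) :=
  match queue with
  | [] => visited
  | c :: q =>
    let st := pvAstep obst width height (visited, q) c
    pvAloop obst width height st.1 st.2
termination_by 2 * pvUn width height visited + queue.length
decreasing_by
  have h := pvAstep_le obst width height visited q c
  simp only [List.length_cons]
  omega

def get_reachable_positions (player_pos : Int × Int) (boxes : List (Int × Int)) (walls : List (Int × Int)) (width : Int) (height : Int) : List (Int × Int) :=
  let obstacles := PySem.Set.union (PySem.Set.ofList walls) boxes
  pvAloop obstacles width height (PySem.Set.ofList [player_pos]) [player_pos]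

-- ===== PORT B =====
-- B's candidate comprehension: all neighbours of the frontier, cell-major, direction order
def pvNbrs (f : List (Int × Int)) : List (Int × Int) :=
  f.flatMap (fun c => pvDirs.map (fun d => (c.1 + d.1, c.2 + d.2)))

-- B's `for n in candidates:` body: filter one candidate into (reachable, frontier)
def pvBsift (obst : PySem.Set (Int × Int)) (width height : Int)
    (st : PySem.Set (Int × Int) × List (Int × Int)) (n : Int × Int) :
    PySem.Set (Int × Int) × List (Int × Int) :=
  if 0 ≤ n.1 ∧ n.1 < width ∧ 0 ≤ n.2 ∧ n.2 < height ∧ n ∉ obst ∧ n ∉ st.1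
  then (PySem.Set.add st.1 n, st.2 ++ [n]) else st

lemma pvBfold_le (obst : PySem.Set (Int × Int)) (width height : Int) :
    ∀ (cs : List (Int × Int)) (v : PySem.Set (Int × Int)) (l : List (Int × Int)),
    2 * pvUn width height (cs.foldl (pvBsift obst width height) (v, l)).1 +
      (cs.foldl (pvBsift obst width height) (v, l)).2.length ≤
      2 * pvUn width height v + l.length := by
  intro cs
  induction cs with
  | nil => intro v l; exact le_refl _
  | cons n cs ih =>
    intro v l
    rw [List.foldl_cons]
    have h1 := ih (pvBsift obst width height (v, l) n).1 (pvBsift obst width height (v, l) n).2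
    rw [Prod.mk.eta] at h1
    refine le_trans h1 ?_
    unfold pvBsift
    exact pvCell_le width height obst v l n

-- B's `while frontier:` loop: flat candidate list, then one sifting pass
def pvBloop (obst : PySem.Set (Int × Int)) (width height : Int)
    (reach : PySem.Set (Int × Int)) (frontier : List (Int × Int)) : List (Int × Int) :=
  if frontier.isEmpty then reach
  else
    let st := (pvNbrs frontier).foldl (pvBsift obst width height)
      (reach, ([] : List (Int × Int)))
    pvBloop obst width height st.1 st.2
termination_by 2 * pvUn width height reach + min frontier.length 1
decreasing_by
  have h := pvBfold_le obst width height (pvNbrs frontier) reach []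
  have hne : frontier ≠ [] := by
    intro he; simp [he] at *
  have hl : 0 < frontier.length := List.length_pos_iff.mpr hne
  simp only [List.length_nil] at h
  omega

def get_reachable_positions_alt (player_pos : Int × Int) (boxes : List (Int × Int)) (walls : List (Int × Int)) (width : Int) (height : Int) : List (Int × Int) :=
  let obstacles := PySem.Set.union (PySem.Set.ofList walls) boxes
  pvBloop obstacles width height (PySem.Set.ofList [player_pos]) [player_pos]

-- ===== PRECONDITION & SPEC =====
def Spec_get_reachable_positions (player_pos : Int × Int) (boxes : List (Int × Int)) (walls : List (Int × Int)) (width : Int) (height : Int) (out : List (Int × Int)) : Prop := out = get_reachable_positions_alt player_pos boxes walls width height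
instance (player_pos : Int × Int) (boxes : List (Int × Int)) (walls : List (Int × Int)) (width : Int) (height : Int) (out : List (Int × Int)) : Decidable (Spec_get_reachable_positions player_pos boxes walls width height out) := by unfold Spec_get_reachable_positions; infer_instance

-- ===== CLAIM (what is proved, stated in full; the proofs are below) =====
def Claim_equal_get_reachable_positions : Prop := ∀ (player_pos : Int × Int) (boxes : List (Int × Int)) (walls : List (Int × Int)) (width : Int) (height : Int), Dom_get_reachable_positions player_pos boxes walls width height → Spec_get_reachable_positions player_pos boxes walls width height (get_reachable_positions player_pos boxes walls width height)

-- ===== LEMMAS AND PROOFS =====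

lemma pvAloop_nil (obst : PySem.Set (Int × Int)) (width height : Int)
    (v : PySem.Set (Int × Int)) : pvAloop obst width height v [] = v := by
  rw [pvAloop.eq_def]

lemma pvAloop_cons (obst : PySem.Set (Int × Int)) (width height : Int)
    (v : PySem.Set (Int × Int)) (c : Int × Int) (q : List (Int × Int)) :
    pvAloop obst width height v (c :: q) =
      pvAloop obst width height (pvAstep obst width height (v, q) c).1
        (pvAstep obst width height (v, q) c).2 := by
  rw [pvAloop.eq_def]

lemma pvBloop_nil (obst : PySem.Set (Int × Int)) (width height : Int)
    (v : PySem.Set (Int × Int)) : pvBloop obst width height v [] = v := by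
  rw [pvBloop.eq_def]
  simp

lemma pvBloop_step (obst : PySem.Set (Int × Int)) (width height : Int)
    (v : PySem.Set (Int × Int)) (f : List (Int × Int)) (hf : f ≠ []) :
    pvBloop obst width height v f =
      pvBloop obst width height
        ((pvNbrs f).foldl (pvBsift obst width height) (v, [])).1
        ((pvNbrs f).foldl (pvBsift obst width height) (v, [])).2 := by
  rw [pvBloop.eq_def]
  simp [List.isEmpty_iff, hf]

-- pvBsift changes the list component only by appending, and neither the appended part nor
-- the new set depends on the incoming list component
lemma pvBsift_append (obst : PySem.Set (Int × Int)) (width height : Int)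
    (v : PySem.Set (Int × Int)) (q l : List (Int × Int)) (n : Int × Int) :
    pvBsift obst width height (v, q ++ l) n =
      ((pvBsift obst width height (v, l) n).1,
        q ++ (pvBsift obst width height (v, l) n).2) := by
  unfold pvBsift
  split_ifs <;> simp

lemma pvBfold_append (obst : PySem.Set (Int × Int)) (width height : Int) :
    ∀ (cs : List (Int × Int)) (v : PySem.Set (Int × Int)) (q l : List (Int × Int)),
    cs.foldl (pvBsift obst width height) (v, q ++ l) =
      ((cs.foldl (pvBsift obst width height) (v, l)).1,
        q ++ (cs.foldl (pvBsift obst width height) (v, l)).2) := by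
  intro cs
  induction cs with
  | nil => intro v q l; rfl
  | cons n cs ih =>
    intro v q l
    simp only [List.foldl_cons, pvBsift_append obst width height v q l n]
    exact ih _ _ _

-- A's per-cell direction loop is the sifting fold over that cell's neighbour list
lemma pvAstep_eq_sift (obst : PySem.Set (Int × Int)) (width height : Int)
    (st : PySem.Set (Int × Int) × List (Int × Int)) (c : Int × Int) :
    pvAstep obst width height st c =
      (pvDirs.map (fun d => (c.1 + d.1, c.2 + d.2))).foldl (pvBsift obst width height) st := by
  unfold pvAstep pvBsift
  rw [List.foldl_map]

-- B's whole-frontier expansion, as a function of the pre-expansion state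
def pvExpand (obst : PySem.Set (Int × Int)) (width height : Int)
    (v : PySem.Set (Int × Int)) (f : List (Int × Int)) :
    PySem.Set (Int × Int) × List (Int × Int) :=
  (pvNbrs f).foldl (pvBsift obst width height) (v, [])

lemma pvExpand_cons (obst : PySem.Set (Int × Int)) (width height : Int)
    (v : PySem.Set (Int × Int)) (c : Int × Int) (f : List (Int × Int)) :
    pvExpand obst width height v (c :: f) =
      ((pvExpand obst width height (pvAstep obst width height (v, []) c).1 f).1,
        (pvAstep obst width height (v, []) c).2 ++
          (pvExpand obst width height (pvAstep obst width height (v, []) c).1 f).2) := by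
  unfold pvExpand pvNbrs
  rw [List.flatMap_cons, List.foldl_append, ← pvAstep_eq_sift]
  have h := pvBfold_append obst width height
    (f.flatMap (fun c => pvDirs.map (fun d => (c.1 + d.1, c.2 + d.2))))
    (pvAstep obst width height (v, []) c).1
    (pvAstep obst width height (v, []) c).2 []
  simpa using h

-- queue splitting: A's loop on frontier ++ acc first digests the whole frontier, producing
-- exactly B's expansion, then continues on acc ++ the newly discovered cells
lemma pvAloop_split (obst : PySem.Set (Int × Int)) (width height : Int) :
    ∀ (f : List (Int × Int)) (v : PySem.Set (Int × Int)) (acc : List (Int × Int)),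
    pvAloop obst width height v (f ++ acc) =
      pvAloop obst width height (pvExpand obst width height v f).1
        (acc ++ (pvExpand obst width height v f).2) := by
  intro f
  induction f with
  | nil => intro v acc; simp [pvExpand, pvNbrs]
  | cons c f ih =>
    intro v acc
    rw [List.cons_append, pvAloop_cons, pvExpand_cons]
    have hst : pvAstep obst width height (v, f ++ acc) c =
        ((pvAstep obst width height (v, []) c).1,
          (f ++ acc) ++ (pvAstep obst width height (v, []) c).2) := by
      rw [pvAstep_eq_sift, pvAstep_eq_sift]
      have h := pvBfold_append obst width height
        (pvDirs.map (fun d => (c.1 + d.1, c.2 + d.2))) v (f ++ acc) []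
      simpa using h
    rw [hst]
    simp only [List.append_assoc]
    rw [ih]
    simp [List.append_assoc]

-- the two loops agree from any common state (strong induction on B's own measure)
lemma pvLoop_eq_aux (obst : PySem.Set (Int × Int)) (width height : Int) :
    ∀ (n : Nat) (v : PySem.Set (Int × Int)) (f : List (Int × Int)),
    2 * pvUn width height v + min f.length 1 ≤ n →
    pvAloop obst width height v f = pvBloop obst width height v f := by
  intro n
  induction n with
  | zero =>
    intro v f h
    cases f with
    | nil => rw [pvAloop_nil, pvBloop_nil]
    | cons c q => simp only [List.length_cons] at h; omega
  | succ n ih =>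
    intro v f h
    cases f with
    | nil => rw [pvAloop_nil, pvBloop_nil]
    | cons c q =>
      have hsplit := pvAloop_split obst width height (c :: q) v []
      rw [List.append_nil] at hsplit
      rw [List.nil_append] at hsplit
      rw [hsplit, pvBloop_step obst width height v (c :: q) (List.cons_ne_nil c q)]
      have hE : pvExpand obst width height v (c :: q) =
          (pvNbrs (c :: q)).foldl (pvBsift obst width height) (v, []) := rfl
      rw [hE]
      apply ih
      have hfold := pvBfold_le obst width height (pvNbrs (c :: q)) v []
      simp only [List.length_nil] at hfold
      simp only [List.length_cons] at h
      omega

-- ===== VERDICT (by name: the statement is the Claim_ definition above) =====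
theorem get_reachable_positions_spec : Claim_equal_get_reachable_positions := by
  intro player_pos boxes walls width height _
  unfold Spec_get_reachable_positions get_reachable_positions get_reachable_positions_alt
  exact pvLoop_eq_aux _ width height
    (2 * pvUn width height (PySem.Set.ofList [player_pos]) + min 1 1) _ _ (le_refl _)
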